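-- pv_equiv track=rewrite | github.com/istale/python_create_image | create_image.py | get_all_shape_bbox_coor_list
-- ===== SOURCE A (Python) =====
-- def get_all_shape_bbox_coor_list(list_layout):
--
--     list_all_x_coor = []
--     list_all_y_coor = []
--     for shape in list_layout:
-- 	    layer = shape[0]
-- 	    coor_list = shape[1]
--
-- 	    list_x_coor = coor_list[0::2]
-- 	    list_all_x_coor.extend(list_x_coor)
--
-- 	    list_y_coor = coor_list[1::2]
-- 	    list_all_y_coor.extend(list_y_coor)
--
--     min_x = min(list_all_x_coor)
--     min_y = min(list_all_y_coor)
--     max_x = max(list_all_x_coor)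
--     max_y = max(list_all_y_coor)
--
--     most_bottom = min_y - 50
--     most_left = min_x - 50
--     most_right = max_x + 50
--     most_top = max_y + 50
--     tuple_return = (int(most_right - most_left), int(most_top - most_bottom))
--     return tuple_return
-- ===== SOURCE B (Python) =====
-- def get_all_shape_bbox_coor_list(list_layout):
--     # One pass over all coordinates with running extrema; even positions are x, odd are y.
--     min_x = max_x = min_y = max_y = None
--     for _, coor in list_layout:
--         for i, v in enumerate(coor):
--             if i % 2 == 0:
--                 if min_x is None or v < min_x:
--                     min_x = v
--                 if max_x is None or v > max_x:
--                     max_x = v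
--             else:
--                 if min_y is None or v < min_y:
--                     min_y = v
--                 if max_y is None or v > max_y:
--                     max_y = v
--     return (max_x - min_x + 100, max_y - min_y + 100)
-- ===== Notes on version B (the rewrite author's own statement) =====
-- stated objective: alternative
-- what changed: B replaces A's build-four-lists-then-min/max pipeline with a single enumerate pass over all coordinates that updates four running min/max accumulators by index parity, never materialising the x/y lists; Pre_ excludes layouts with no coordinate list of length >= 2, on which A raises ValueError (min of an empty sequence) and B raises TypeError.
import Mathlib
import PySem

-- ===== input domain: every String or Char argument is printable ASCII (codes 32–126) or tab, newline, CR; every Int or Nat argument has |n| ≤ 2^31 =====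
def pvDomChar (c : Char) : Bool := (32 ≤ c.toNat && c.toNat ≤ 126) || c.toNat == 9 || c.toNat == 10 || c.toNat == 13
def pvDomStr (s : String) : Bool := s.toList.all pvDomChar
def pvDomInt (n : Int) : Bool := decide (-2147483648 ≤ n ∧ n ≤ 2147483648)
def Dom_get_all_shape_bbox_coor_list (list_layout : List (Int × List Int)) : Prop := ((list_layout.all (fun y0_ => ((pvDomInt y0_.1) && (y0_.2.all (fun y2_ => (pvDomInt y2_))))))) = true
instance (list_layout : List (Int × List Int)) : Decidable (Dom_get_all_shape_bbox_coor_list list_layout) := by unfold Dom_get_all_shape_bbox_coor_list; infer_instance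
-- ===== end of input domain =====

-- B makes one enumerate pass with running min/max accumulators instead of materialising the x/y
-- lists and calling min/max four times (objective: alternative decomposition, same asymptotic cost).

-- B-side helpers:
-- `if o is None or v < o: o = v` on a running minimum
def pvUpdMin (o : Option Int) (v : Int) : Option Int :=
  match o with
  | none => some v
  | some m => if v < m then some v else some m

-- `if o is None or v > o: o = v` on a running maximum
def pvUpdMax (o : Option Int) (v : Int) : Option Int :=
  match o with
  | none => some v
  | some m => if m < v then some v else some m

-- B's `for i, v in enumerate(coor)` loop, carrying the index i and the four accumulators
def pvScan : Nat → List Int → Option Int × Option Int × Option Int × Option Int →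
    Option Int × Option Int × Option Int × Option Int
  | _, [], s => s
  | i, v :: t, (mnx, mxx, mny, mxy) =>
      pvScan (i + 1) t
        (if i % 2 = 0 then (pvUpdMin mnx v, pvUpdMax mxx v, mny, mxy)
         else (mnx, mxx, pvUpdMin mny v, pvUpdMax mxy v))

-- final step of B: the two box sides from the four accumulators (the (0,0) arm is unreachable
-- under Pre_: Python B raises TypeError there, on None arithmetic)
def pvFour : Option Int × Option Int × Option Int × Option Int → Int × Int
  | (some min_x, some max_x, some min_y, some max_y) => (max_x - min_x + 100, max_y - min_y + 100)
  | _ => (0, 0)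

-- ===== PORT A =====
-- literal port: accumulate the even-index and odd-index slices of every shape, then min/max each.
-- The `(0,0)` fall-through is unreachable under Pre_: Python's min/max raise ValueError on an empty list.
def get_all_shape_bbox_coor_list (list_layout : List (Int × List Int)) : Int × Int :=
  let lists := list_layout.foldl
    (fun (acc : List Int × List Int) shape =>
      let coor_list := shape.2
      -- coor_list[0::2] / coor_list[1::2]; step 2 ≠ 0 so slice? is always `some`
      let list_x_coor := (PySem.List.slice? coor_list (some 0) none 2).getD []
      let list_y_coor := (PySem.List.slice? coor_list (some 1) none 2).getD []
      (acc.1 ++ list_x_coor, acc.2 ++ list_y_coor))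
    ([], [])
  match PySem.List.min? lists.1 (fun y => y), PySem.List.min? lists.2 (fun y => y),
        PySem.List.max? lists.1 (fun y => y), PySem.List.max? lists.2 (fun y => y) with
  | some min_x, some min_y, some max_x, some max_y =>
      let most_bottom := min_y - 50
      let most_left := min_x - 50
      let most_right := max_x + 50
      let most_top := max_y + 50
      (most_right - most_left, most_top - most_bottom)
  | _, _, _, _ => (0, 0)

-- ===== PORT B =====
def get_all_shape_bbox_coor_list_alt (list_layout : List (Int × List Int)) : Int × Int :=
  pvFour (list_layout.foldl (fun s shape => pvScan 0 shape.2 s) (none, none, none, none))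

-- ===== PRECONDITION & SPEC =====
-- Pre_ excludes exactly the inputs on which Python A raises ValueError (min() of an empty sequence):
-- layouts in which no shape has a coordinate list with at least two entries (so no y-coordinate exists).
def Pre_get_all_shape_bbox_coor_list (list_layout : List (Int × List Int)) : Prop :=
  ∃ p ∈ list_layout, 2 ≤ p.2.length

instance (list_layout : List (Int × List Int)) : Decidable (Pre_get_all_shape_bbox_coor_list list_layout) := by
  unfold Pre_get_all_shape_bbox_coor_list; infer_instance

def pvWitness_get_all_shape_bbox_coor_list : (List (Int × List Int)) := ([(1, [0, 5])])

def Spec_get_all_shape_bbox_coor_list (list_layout : List (Int × List Int)) (out : Int × Int) : Prop := out = get_all_shape_bbox_coor_list_alt list_layout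
instance (list_layout : List (Int × List Int)) (out : Int × Int) : Decidable (Spec_get_all_shape_bbox_coor_list list_layout out) := by unfold Spec_get_all_shape_bbox_coor_list; infer_instance

-- ===== CLAIM (what is proved, stated in full; the proofs are below) =====
def Claim_equal_get_all_shape_bbox_coor_list : Prop := ∀ (list_layout : List (Int × List Int)), Dom_get_all_shape_bbox_coor_list list_layout → Pre_get_all_shape_bbox_coor_list list_layout → Spec_get_all_shape_bbox_coor_list list_layout (get_all_shape_bbox_coor_list list_layout)

-- ===== LEMMAS AND PROOFS =====

-- the even-index and odd-index elements of a list (what [0::2] and [1::2] select)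
def pvEvens : List Int → List Int
  | [] => []
  | [v] => [v]
  | v :: _ :: t => v :: pvEvens t

def pvOdds : List Int → List Int
  | [] => []
  | [_] => []
  | _ :: w :: t => w :: pvOdds t

theorem aux_even (l : List Int) :
    (List.range ((l.length + 1) / 2)).filterMap (fun k : Nat => l[(2 * (k:Int)).toNat]?) = pvEvens l := by
  induction l using pvEvens.induct with
  | case1 => simp [pvEvens]
  | case2 v => simp [pvEvens, List.range_succ]
  | case3 v w t ih =>
      have hc : (((v :: w :: t).length + 1) / 2) = (t.length + 1) / 2 + 1 := by
        simp [List.length_cons]; omega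
      rw [hc, List.range_succ_eq_map, List.filterMap_cons, List.filterMap_map]
      have h1 : (fun k : Nat => (v :: w :: t)[(2 * ((k:Nat):Int)).toNat]?) ∘ Nat.succ
          = fun k : Nat => t[(2 * (k:Int)).toNat]? := by
        funext k
        simp only [Function.comp]
        have h2 : (2 * (((Nat.succ k):Nat):Int)).toNat = 2 * k + 2 := by push_cast; omega
        have h3 : (2 * ((k:Nat):Int)).toNat = 2 * k := by omega
        rw [h2, h3]
        rfl
      rw [h1, ih]
      simp [pvEvens]

theorem slice?_step2_even (l : List Int) :
    PySem.List.slice? l (some 0) none 2 = some (pvEvens l) := by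
  rw [← aux_even l]
  simp only [PySem.List.slice?, PySem.List.sliceIndices]
  norm_num
  have hc : (if 0 < l.length then (((l.length:Int) + 2 - 1) / 2).toNat else 0) = (l.length + 1) / 2 := by
    split <;> omega
  rw [hc]

theorem aux_odd (l : List Int) :
    (List.range (l.length / 2)).filterMap (fun k : Nat => l[(1 + 2 * (k:Int)).toNat]?) = pvOdds l := by
  induction l using pvOdds.induct with
  | case1 => simp [pvOdds]
  | case2 v => simp [pvOdds]
  | case3 v w t ih =>
      have hc : ((v :: w :: t).length / 2) = t.length / 2 + 1 := by
        simp [List.length_cons]; omega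
      rw [hc, List.range_succ_eq_map, List.filterMap_cons, List.filterMap_map]
      have h1 : (fun k : Nat => (v :: w :: t)[(1 + 2 * ((k:Nat):Int)).toNat]?) ∘ Nat.succ
          = fun k : Nat => t[(1 + 2 * (k:Int)).toNat]? := by
        funext k
        simp only [Function.comp]
        have h2 : (1 + 2 * (((Nat.succ k):Nat):Int)).toNat = 2 * k + 3 := by push_cast; omega
        have h3 : (1 + 2 * ((k:Nat):Int)).toNat = 2 * k + 1 := by omega
        rw [h2, h3]
        rfl
      rw [h1, ih]
      simp [pvOdds]

theorem slice?_step2_odd (l : List Int) :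
    PySem.List.slice? l (some 1) none 2 = some (pvOdds l) := by
  rcases Nat.eq_zero_or_pos l.length with h0 | hpos
  · rw [List.eq_nil_of_length_eq_zero h0]; rfl
  · rw [← aux_odd l]
    simp only [PySem.List.slice?, PySem.List.sliceIndices]
    norm_num
    have hm : min 1 (l.length : Int) = 1 := by omega
    rw [hm]
    have hc : (if (1:Nat) < l.length then (((l.length:Int) - 1 + 2 - 1) / 2).toNat else 0) = l.length / 2 := by
      split <;> omega
    rw [hc]

-- A's accumulation loop computes the concatenations of the even/odd selections
theorem foldA_eq (L : List (Int × List Int)) (a b : List Int) :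
    L.foldl (fun (acc : List Int × List Int) shape =>
        (acc.1 ++ (PySem.List.slice? shape.2 (some 0) none 2).getD [],
         acc.2 ++ (PySem.List.slice? shape.2 (some 1) none 2).getD [])) (a, b)
      = (a ++ L.flatMap (fun sh => pvEvens sh.2), b ++ L.flatMap (fun sh => pvOdds sh.2)) := by
  induction L generalizing a b with
  | nil => simp
  | cons h t ih =>
      simp only [List.foldl_cons]
      rw [ih]
      simp [slice?_step2_even, slice?_step2_odd, List.append_assoc]

-- B's inner enumerate loop, characterised by folds over the even/odd selections
theorem scan_eq (l : List Int) (i : Nat) (hi : i % 2 = 0) (mnx mxx mny mxy : Option Int) :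
    pvScan i l (mnx, mxx, mny, mxy)
      = ((pvEvens l).foldl pvUpdMin mnx, (pvEvens l).foldl pvUpdMax mxx,
         (pvOdds l).foldl pvUpdMin mny, (pvOdds l).foldl pvUpdMax mxy) := by
  induction l using pvEvens.induct generalizing i mnx mxx mny mxy with
  | case1 => simp [pvScan, pvEvens, pvOdds]
  | case2 v => simp [pvScan, pvEvens, pvOdds, hi]
  | case3 v w t ih =>
      have h1 : (i + 1) % 2 ≠ 0 := by omega
      have h2 : (i + 1 + 1) % 2 = 0 := by omega
      simp [pvScan, pvEvens, pvOdds, hi, h1, ih _ h2]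

theorem foldB_eq (L : List (Int × List Int)) (mnx mxx mny mxy : Option Int) :
    L.foldl (fun s shape => pvScan 0 shape.2 s) (mnx, mxx, mny, mxy)
      = ((L.flatMap (fun sh => pvEvens sh.2)).foldl pvUpdMin mnx,
         (L.flatMap (fun sh => pvEvens sh.2)).foldl pvUpdMax mxx,
         (L.flatMap (fun sh => pvOdds sh.2)).foldl pvUpdMin mny,
         (L.flatMap (fun sh => pvOdds sh.2)).foldl pvUpdMax mxy) := by
  induction L generalizing mnx mxx mny mxy with
  | nil => simp
  | cons h t ih =>
      simp only [List.foldl_cons]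
      rw [scan_eq _ 0 rfl, ih]
      simp [List.flatMap_cons, List.foldl_append]

theorem min?_eq_foldl (xs : List Int) :
    PySem.List.min? xs (fun y => y) = xs.foldl pvUpdMin none := by
  unfold PySem.List.min?
  congr 1
  funext acc x
  cases acc <;> rfl

theorem max?_eq_foldl (xs : List Int) :
    PySem.List.max? xs (fun y => y) = xs.foldl pvUpdMax none := by
  unfold PySem.List.max?
  congr 1
  funext acc x
  cases acc <;> rfl

-- ===== VERDICT (by name: the statement is the Claim_ definition above) =====
theorem get_all_shape_bbox_coor_list_spec : Claim_equal_get_all_shape_bbox_coor_list := by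
  intro L _ _
  unfold Spec_get_all_shape_bbox_coor_list
  unfold get_all_shape_bbox_coor_list get_all_shape_bbox_coor_list_alt pvFour
  rw [foldA_eq, foldB_eq]
  simp only [List.nil_append, min?_eq_foldl, max?_eq_foldl]
  rcases hx : (L.flatMap (fun sh => pvEvens sh.2)).foldl pvUpdMin none with _ | mnx <;>
  rcases hX : (L.flatMap (fun sh => pvEvens sh.2)).foldl pvUpdMax none with _ | mxx <;>
  rcases hy : (L.flatMap (fun sh => pvOdds sh.2)).foldl pvUpdMin none with _ | mny <;>
  rcases hY : (L.flatMap (fun sh => pvOdds sh.2)).foldl pvUpdMax none with _ | mxy <;>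
  simp only [hx, hX, hy, hY] <;>
  first
    | rfl
    | (refine Prod.ext ?_ ?_ <;> dsimp <;> ring)
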